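-- pv_equiv track=rewrite | github.com/msndattatreya/Aiml_project | ai_project.py | check_room_collisions
-- ===== SOURCE A (Python) =====
-- def check_room_collisions(faculty_assignments):
--     room_assignments = {}
--     for faculty, subject in faculty_assignments.items():
--         if subject is not None:
--             room = room_assignments.get(subject)
--             if room is not None:
--                 return False
--             room_assignments[subject] = faculty
--     return True
-- ===== SOURCE B (Python) =====
-- def check_room_collisions(faculty_assignments):
--     subjects = sorted(s for s in faculty_assignments.values() if s is not None)
--     return all(a != b for a, b in zip(subjects, subjects[1:]))
-- ===== Notes on version B (the rewrite author's own statement) =====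
-- stated objective: alternative
-- what changed: Replaces A's one-pass hash-dict membership loop with a sort-then-adjacent-scan: sort the non-None subjects, then check that no two neighbours are equal (duplicates are adjacent after sorting).
import Mathlib
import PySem

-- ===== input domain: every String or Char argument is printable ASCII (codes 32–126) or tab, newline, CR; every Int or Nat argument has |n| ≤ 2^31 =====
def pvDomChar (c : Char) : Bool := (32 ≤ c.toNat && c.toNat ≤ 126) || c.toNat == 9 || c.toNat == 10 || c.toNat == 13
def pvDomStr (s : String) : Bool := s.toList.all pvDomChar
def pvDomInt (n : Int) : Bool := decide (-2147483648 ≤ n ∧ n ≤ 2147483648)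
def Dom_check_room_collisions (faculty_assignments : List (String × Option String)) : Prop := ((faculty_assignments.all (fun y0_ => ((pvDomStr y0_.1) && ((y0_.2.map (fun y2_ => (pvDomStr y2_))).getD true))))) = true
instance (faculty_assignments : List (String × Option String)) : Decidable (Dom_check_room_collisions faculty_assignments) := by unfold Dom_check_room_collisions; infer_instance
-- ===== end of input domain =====

-- B replaces A's one-pass hash-dict loop by sort-then-adjacent-scan:
-- sort the non-None subjects and check no two neighbours are equal (objective: alternative).

-- ===== PORT A =====
-- the for-loop with its early 'return False', as structural recursion over the items
def pvALoop : List (String × Option String) → PySem.Dict String String → Bool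
  | [], _ => true
  | (faculty, subject) :: rest, room_assignments =>
    match subject with
    | none => pvALoop rest room_assignments
    | some s =>
      match room_assignments.get? s with
      | some _ => false
      | none => pvALoop rest (room_assignments.insert s faculty)

def check_room_collisions (faculty_assignments : List (String × Option String)) : Bool :=
  pvALoop faculty_assignments PySem.Dict.empty

-- ===== PORT B =====
def check_room_collisions_alt (faculty_assignments : List (String × Option String)) : Bool :=
  let subjects := PySem.List.sorted (faculty_assignments.filterMap (fun p => p.2)) (fun x => x) false
  ((subjects.zip (subjects.drop 1)).all (fun p => p.1 != p.2))

-- ===== PRECONDITION & SPEC =====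
def Spec_check_room_collisions (faculty_assignments : List (String × Option String)) (out : Bool) : Prop := out = check_room_collisions_alt faculty_assignments
instance (faculty_assignments : List (String × Option String)) (out : Bool) : Decidable (Spec_check_room_collisions faculty_assignments out) := by unfold Spec_check_room_collisions; infer_instance

-- ===== CLAIM (what is proved, stated in full; the proofs are below) =====
def Claim_equal_check_room_collisions : Prop := ∀ (faculty_assignments : List (String × Option String)), Dom_check_room_collisions faculty_assignments → Spec_check_room_collisions faculty_assignments (check_room_collisions faculty_assignments)

-- ===== LEMMAS AND PROOFS =====

-- A's loop returns true iff the non-None subjects are duplicate-free and none is already seen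
theorem pvALoop_true_iff (l : List (String × Option String)) (d : PySem.Dict String String) :
    pvALoop l d = true ↔
      (l.filterMap (fun p => p.2)).Nodup ∧ ∀ s ∈ l.filterMap (fun p => p.2), d.get? s = none := by
  induction l generalizing d with
  | nil => simp [pvALoop]
  | cons p rest ih =>
    obtain ⟨f, subj⟩ := p
    cases subj with
    | none => simpa [pvALoop] using ih d
    | some s =>
      show (match d.get? s with
            | some _ => false
            | none => pvALoop rest (d.insert s f)) = true ↔ _
      simp only [List.filterMap_cons, List.nodup_cons, List.mem_cons]
      cases hd : d.get? s with
      | some v =>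
        show (false = true) ↔ _
        constructor
        · intro h; cases h
        · rintro ⟨-, h2⟩
          have := h2 s (Or.inl rfl)
          rw [hd] at this; cases this
      | none =>
        show pvALoop rest (d.insert s f) = true ↔ _
        rw [ih]
        constructor
        · rintro ⟨hnd, hall⟩
          refine ⟨⟨?_, hnd⟩, ?_⟩
          · intro hmem
            have := hall s hmem
            rw [PySem.Dict.get?_insert_self] at this; cases this
          · rintro t (rfl | ht)
            · exact hd
            · have := hall t ht
              by_cases hts : t = s
              · subst hts; exact hd
              · rwa [PySem.Dict.get?_insert_of_ne _ _ hts] at this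
        · rintro ⟨⟨hns, hnd⟩, hall⟩
          refine ⟨hnd, ?_⟩
          intro t ht
          have hts : t ≠ s := fun h => hns (h ▸ ht)
          rw [PySem.Dict.get?_insert_of_ne _ _ hts]
          exact hall t (Or.inr ht)

-- the zip-with-tail all-distinct scan is the adjacent-distinct (IsChain) predicate
theorem pvZipAll_iff_chain' (l : List String) :
    ((l.zip (l.drop 1)).all (fun p => p.1 != p.2)) = true ↔ l.IsChain (· ≠ ·) := by
  induction l with
  | nil => simp
  | cons a l ih =>
    cases l with
    | nil => simp
    | cons b l =>
      simp only [List.drop_one, List.tail_cons, List.zip_cons_cons, List.all_cons,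
        Bool.and_eq_true, bne_iff_ne, List.isChain_cons_cons] at *
      tauto

-- on a ≤-sorted list, adjacent-distinct is the same as duplicate-free
theorem pvChain'_ne_iff_nodup (l : List String) (hs : l.Pairwise (· ≤ ·)) :
    l.IsChain (· ≠ ·) ↔ l.Nodup := by
  constructor
  · intro hc
    have hlt : l.IsChain (· < ·) := by
      have hsc : l.IsChain (· ≤ ·) := hs.isChain
      rw [List.isChain_iff_getElem] at *
      intro i h
      exact lt_of_le_of_ne (hsc i h) (hc i h)
    exact (List.isChain_iff_pairwise.mp hlt).nodup
  · intro hn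
    exact List.Pairwise.isChain hn

-- ===== VERDICT (by name: the statement is the Claim_ definition above) =====
theorem check_room_collisions_spec : Claim_equal_check_room_collisions := by
  intro fa _
  unfold Spec_check_room_collisions check_room_collisions check_room_collisions_alt
  rw [Bool.eq_iff_iff]
  rw [pvALoop_true_iff]
  rw [pvZipAll_iff_chain',
    pvChain'_ne_iff_nodup _ (by simpa using PySem.List.sorted_pairwise (fa.filterMap (fun p => p.2)) (fun x => x)),
    (PySem.List.sorted_perm (fa.filterMap (fun p => p.2)) (fun x => x) false).nodup_iff]
  simp [PySem.Dict.get?_empty]
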